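-- pv_equiv track=rewrite | github.com/iashevyakov/algos-sql-training | algos-ya-training-8/dynamic/table_chain.py | get_max_chain_length
-- ===== SOURCE A (Python) =====
-- def get_chain_length(i: int, j: int, chain_lengths: dict, table: list[list[int]], n: int, m: int) -> int:
--     if (i, j) in chain_lengths:
--         return chain_lengths[(i, j)]
--
--     table_num = table[i][j]
--     max_chain_len = 1
--     directions = [(0, 1), (1, 0), (0, -1), (-1, 0)]
--     for di, dj in directions:
--         ii, jj = i + di, j + dj
--         if 0 <= ii < n and 0 <= jj < m:
--             neighbor_num = table[ii][jj]
--             if neighbor_num == table_num + 1: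
--                 chain_len = 1 + get_chain_length(ii, jj, chain_lengths, table, n, m)
--                 max_chain_len = max(max_chain_len, chain_len)
--     chain_lengths[(i, j)] = max_chain_len
--     return max_chain_len
--
-- def get_max_chain_length(n: int, m: int, table: list[list[int]]) -> int:
--     max_chain_length = 0
--     chain_lengths = {}
--     for i in range(n):
--         for j in range(m):
--             chain_length = get_chain_length(i, j, chain_lengths, table, n, m)
--             max_chain_length = max(max_chain_length, chain_length)
--     return max_chain_length
-- ===== SOURCE B (Python) =====
-- def get_max_chain_length(n: int, m: int, table: list[list[int]]) -> int:
--     # Value-descending DP: process cells from largest value down; every value+1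
--     # neighbor is already finalized, so no recursion and no memo lookups re-enter.
--     cells = [(table[i][j], i, j) for i in range(n) for j in range(m)]
--     cells.sort(key=lambda c: c[0], reverse=True)
--     dp = {}
--     best = 0
--     for v, i, j in cells:
--         length = 1
--         for ii, jj in ((i, j + 1), (i + 1, j), (i, j - 1), (i - 1, j)):
--             if 0 <= ii < n and 0 <= jj < m and table[ii][jj] == v + 1:
--                 length = max(length, 1 + dp.get((ii, jj), 0))
--         dp[(i, j)] = length
--         if length > best:
--             best = length
--     return best
-- ===== Notes on version B (the rewrite author's own statement) =====
-- stated objective: alternative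
-- what changed: Replaces the memoized depth-first recursion over neighbors by an iterative DP: all cells are listed, sorted by value descending, and processed in one pass so every value+1 neighbor is already finalized (no recursion, no memo re-entry).
import Mathlib
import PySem

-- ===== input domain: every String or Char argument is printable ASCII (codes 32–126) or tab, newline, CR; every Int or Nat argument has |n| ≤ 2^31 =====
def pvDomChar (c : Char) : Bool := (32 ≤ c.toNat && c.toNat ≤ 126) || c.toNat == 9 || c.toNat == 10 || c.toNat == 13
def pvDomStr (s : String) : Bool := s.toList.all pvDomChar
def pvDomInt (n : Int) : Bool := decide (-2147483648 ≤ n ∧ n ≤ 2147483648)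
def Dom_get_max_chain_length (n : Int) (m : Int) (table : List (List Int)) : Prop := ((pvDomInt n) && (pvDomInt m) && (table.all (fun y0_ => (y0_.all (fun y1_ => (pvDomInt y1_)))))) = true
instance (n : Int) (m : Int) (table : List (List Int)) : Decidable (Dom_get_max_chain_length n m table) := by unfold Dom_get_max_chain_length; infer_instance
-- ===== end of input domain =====

-- B replaces A's memoized depth-first recursion by a single value-descending sorted
-- pass over all cells with a plain DP dictionary (alternative decomposition, no
-- recursion); return values proved equal on all inputs admitted by Pre_.

-- table[x][y]: literal transliteration of the subscription both Pythons perform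
-- (exact under Pre_, where every performed subscription is in range)
def tblGet (table : List (List Int)) (x y : Int) : Int :=
  ((PySem.List.pyGet? table x).bind (fun row => PySem.List.pyGet? row y)).getD 0

-- ===== PORT A =====
-- get_chain_length(i, j, chain_lengths, table, n, m); fuel is only a totality guard
-- (proved sufficient at fuel = n*m+1: the value strictly grows along the recursion,
-- so its depth is bounded by the number of cells with a larger value)
def get_chain_length (fuel : Nat) (i j : Int) (chain_lengths : PySem.Dict (Int × Int) Int)
    (table : List (List Int)) (n m : Int) : Int × PySem.Dict (Int × Int) Int :=
  match fuel with
  | 0 => (0, chain_lengths)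
  | fuel + 1 =>
    match chain_lengths.get? (i, j) with
    | some v => (v, chain_lengths)
    | none =>
      let table_num := tblGet table i j
      let st := [((0:Int), (1:Int)), (1, 0), (0, -1), (-1, 0)].foldl
        (fun (st : Int × PySem.Dict (Int × Int) Int) d =>
          let ii := i + d.1
          let jj := j + d.2
          if 0 ≤ ii ∧ ii < n ∧ 0 ≤ jj ∧ jj < m then
            let neighbor_num := tblGet table ii jj
            if neighbor_num = table_num + 1 then
              let r := get_chain_length fuel ii jj st.2 table n m
              (max st.1 (1 + r.1), r.2)
            else st
          else st) (1, chain_lengths)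
      (st.1, st.2.insert (i, j) st.1)

def get_max_chain_length (n : Int) (m : Int) (table : List (List Int)) : Int :=
  let fuel := n.toNat * m.toNat + 1
  let res := (PySem.List.pyRange 0 n 1).foldl
    (fun (st : Int × PySem.Dict (Int × Int) Int) i =>
      (PySem.List.pyRange 0 m 1).foldl
        (fun (st : Int × PySem.Dict (Int × Int) Int) j =>
          let r := get_chain_length fuel i j st.2 table n m
          (max st.1 r.1, r.2)) st) (0, PySem.Dict.empty)
  res.1

-- ===== PORT B =====
def get_max_chain_length_alt (n : Int) (m : Int) (table : List (List Int)) : Int :=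
  let cells := (PySem.List.pyRange 0 n 1).flatMap
    (fun i => (PySem.List.pyRange 0 m 1).map (fun j => (tblGet table i j, i, j)))
  let cells := PySem.List.sorted cells (fun c => c.1) true
  let res := cells.foldl
    (fun (st : Int × PySem.Dict (Int × Int) Int) c =>
      let best := st.1
      let dp := st.2
      let v := c.1
      let i := c.2.1
      let j := c.2.2
      let length := [(i, j + 1), (i + 1, j), (i, j - 1), (i - 1, j)].foldl
        (fun len p =>
          if 0 ≤ p.1 ∧ p.1 < n ∧ 0 ≤ p.2 ∧ p.2 < m ∧ tblGet table p.1 p.2 = v + 1 then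
            max len (1 + dp.getD p 0)
          else len) 1
      (if length > best then length else best, dp.insert (i, j) length))
    (0, PySem.Dict.empty)
  res.1

-- ===== PRECONDITION & SPEC =====
-- Pre_ excludes exactly the inputs where Python A raises IndexError: a non-empty
-- iteration space (0 < n and 0 < m) whose first n rows do not all exist with at
-- least m entries each.
def Pre_get_max_chain_length (n : Int) (m : Int) (table : List (List Int)) : Prop :=
  0 < n → 0 < m → (n.toNat ≤ table.length ∧ ∀ row ∈ table.take n.toNat, m.toNat ≤ row.length)
instance (n : Int) (m : Int) (table : List (List Int)) : Decidable (Pre_get_max_chain_length n m table) := by unfold Pre_get_max_chain_length; infer_instance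
def pvWitness_get_max_chain_length : Int × Int × List (List Int) := (2, 2, [[1, 2], [4, 3]])

def Spec_get_max_chain_length (n : Int) (m : Int) (table : List (List Int)) (out : Int) : Prop := out = get_max_chain_length_alt n m table
instance (n : Int) (m : Int) (table : List (List Int)) (out : Int) : Decidable (Spec_get_max_chain_length n m table out) := by unfold Spec_get_max_chain_length; infer_instance

-- ===== CLAIM (what is proved, stated in full; the proofs are below) =====
def Claim_equal_get_max_chain_length : Prop := ∀ (n : Int) (m : Int) (table : List (List Int)), Dom_get_max_chain_length n m table → Pre_get_max_chain_length n m table → Spec_get_max_chain_length n m table (get_max_chain_length n m table)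

-- ===== LEMMAS AND PROOFS =====

-- value of cell (i, j), for nonnegative in-bounds coordinates
def valI (table : List (List Int)) (i j : Int) : Int := (table.getD i.toNat []).getD j.toNat 0

-- number of cells whose value is larger than that of (i, j)
def gBig (table : List (List Int)) (n m : Int) (i j : Int) : Nat :=
  ((Finset.range n.toNat ×ˢ Finset.range m.toNat).filter
    (fun p => valI table i j < valI table (p.1 : Int) (p.2 : Int))).card

-- fueled reference chain length
def chain (table : List (List Int)) (n m : Int) : Nat → Int → Int → Int
  | 0, _, _ => 1
  | f + 1, i, j =>
    [((0:Int), (1:Int)), (1, 0), (0, -1), (-1, 0)].foldl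
      (fun mx d =>
        if 0 ≤ i + d.1 ∧ i + d.1 < n ∧ 0 ≤ j + d.2 ∧ j + d.2 < m ∧
            valI table (i + d.1) (j + d.2) = valI table i j + 1 then
          max mx (1 + chain table n m f (i + d.1) (j + d.2))
        else mx) 1

-- the (fuel-stable) chain length of (i, j)
def Cc (table : List (List Int)) (n m : Int) (i j : Int) : Int :=
  chain table n m (gBig table n m i j + 1) i j

theorem qual_g_lt (table : List (List Int)) (n m : Int) (i j ii jj : Int)
    (h1 : 0 ≤ ii) (h2 : ii < n) (h3 : 0 ≤ jj) (h4 : jj < m)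
    (h5 : valI table ii jj = valI table i j + 1) :
    gBig table n m ii jj < gBig table n m i j := by
  have hvv : valI table (ii.toNat : Int) (jj.toNat : Int) = valI table ii jj := by
    simp only [valI, Int.toNat_natCast]
  apply Finset.card_lt_card
  constructor
  · intro p hp
    simp only [Finset.mem_filter] at hp ⊢
    exact ⟨hp.1, by omega⟩
  · intro hsub
    have hmem : (ii.toNat, jj.toNat) ∈ (Finset.range n.toNat ×ˢ Finset.range m.toNat).filter
        (fun p => valI table i j < valI table (p.1 : Int) (p.2 : Int)) := by
      simp only [Finset.mem_filter, Finset.mem_product, Finset.mem_range]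
      exact ⟨⟨by omega, by omega⟩, by rw [hvv]; omega⟩
    have := hsub hmem
    simp only [Finset.mem_filter] at this
    rw [hvv] at this
    omega

theorem chain_stable (table : List (List Int)) (n m : Int) :
    ∀ f i j, gBig table n m i j < f → chain table n m f i j = Cc table n m i j := by
  intro f
  induction f using Nat.strong_induction_on with
  | _ f IH =>
    intro i j hf
    match f, hf with
    | k + 1, hf =>
      unfold Cc
      show chain table n m (k+1) i j = chain table n m (gBig table n m i j + 1) i j
      unfold chain
      apply PySem.List.foldl_congr_mem
      intro mx d _
      by_cases hq : 0 ≤ i + d.1 ∧ i + d.1 < n ∧ 0 ≤ j + d.2 ∧ j + d.2 < m ∧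
          valI table (i + d.1) (j + d.2) = valI table i j + 1
      · rw [if_pos hq, if_pos hq]
        have hlt := qual_g_lt table n m i j (i + d.1) (j + d.2) hq.1 hq.2.1 hq.2.2.1 hq.2.2.2.1 hq.2.2.2.2
        rw [IH k (by omega) _ _ (by omega), IH (gBig table n m i j) (by omega) _ _ (by omega)]
      · rw [if_neg hq, if_neg hq]

theorem Cc_unfold (table : List (List Int)) (n m : Int) (i j : Int) :
    Cc table n m i j =
      [((0:Int), (1:Int)), (1, 0), (0, -1), (-1, 0)].foldl
        (fun mx d =>
          if 0 ≤ i + d.1 ∧ i + d.1 < n ∧ 0 ≤ j + d.2 ∧ j + d.2 < m ∧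
              valI table (i + d.1) (j + d.2) = valI table i j + 1 then
            max mx (1 + Cc table n m (i + d.1) (j + d.2))
          else mx) 1 := by
  conv_lhs => rw [Cc]
  unfold chain
  apply PySem.List.foldl_congr_mem
  intro mx d _
  by_cases hq : 0 ≤ i + d.1 ∧ i + d.1 < n ∧ 0 ≤ j + d.2 ∧ j + d.2 < m ∧
      valI table (i + d.1) (j + d.2) = valI table i j + 1
  · rw [if_pos hq, if_pos hq]
    have hlt := qual_g_lt table n m i j (i + d.1) (j + d.2) hq.1 hq.2.1 hq.2.2.1 hq.2.2.2.1 hq.2.2.2.2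
    rw [chain_stable table n m _ _ _ (by omega)]
  · rw [if_neg hq, if_neg hq]

theorem gBig_lt_fuel (table : List (List Int)) (n m : Int) (i j : Int) :
    gBig table n m i j < n.toNat * m.toNat + 1 := by
  have := Finset.card_filter_le (Finset.range n.toNat ×ˢ Finset.range m.toNat)
    (fun p => valI table i j < valI table (p.1 : Int) (p.2 : Int))
  simp [Finset.card_product] at this
  unfold gBig; omega

theorem tblGet_eq_valI (table : List (List Int)) (n m : Int)
    (hpre : Pre_get_max_chain_length n m table) (i j : Int)
    (h1 : 0 ≤ i) (h2 : i < n) (h3 : 0 ≤ j) (h4 : j < m) :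
    tblGet table i j = valI table i j := by
  obtain ⟨hn, hrows⟩ := hpre (by omega) (by omega)
  have hi : i.toNat < table.length := by omega
  have hrow : m.toNat ≤ table[i.toNat].length := by
    apply hrows
    rw [List.mem_take_iff_getElem]
    exact ⟨i.toNat, by omega, rfl⟩
  have hj : j.toNat < table[i.toNat].length := by omega
  rw [tblGet, PySem.List.pyGet?_of_nonneg _ h1]
  rw [List.getElem?_eq_getElem hi]
  simp only [Option.bind_some]
  rw [PySem.List.pyGet?_of_nonneg _ h3, List.getElem?_eq_getElem hj]
  simp [valI, List.getD, List.getElem?_eq_getElem hi, List.getElem?_eq_getElem hj]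

def GoodMemo (table : List (List Int)) (n m : Int) (d : PySem.Dict (Int × Int) Int) : Prop :=
  ∀ p v, d.get? p = some v → v = Cc table n m p.1 p.2

theorem get_chain_length_correct (table : List (List Int)) (n m : Int)
    (hpre : Pre_get_max_chain_length n m table) :
    ∀ fuel i j memo, GoodMemo table n m memo →
      0 ≤ i → i < n → 0 ≤ j → j < m → gBig table n m i j < fuel →
      (get_chain_length fuel i j memo table n m).1 = Cc table n m i j ∧
      GoodMemo table n m (get_chain_length fuel i j memo table n m).2 := by
  intro fuel
  induction fuel using Nat.strong_induction_on with
  | _ fuel IH =>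
    intro i j memo hgood hi1 hi2 hj1 hj2 hfuel
    match fuel, hfuel with
    | k + 1, hfuel =>
      simp only [get_chain_length]
      cases hmg : memo.get? (i, j) with
      | some v => exact ⟨hgood (i, j) v hmg, hgood⟩
      | none =>
        simp only []
        have hv : tblGet table i j = valI table i j := tblGet_eq_valI table n m hpre i j hi1 hi2 hj1 hj2
        have inner : ∀ (l : List (Int × Int)) (mx : Int) (d0 : PySem.Dict (Int × Int) Int),
            GoodMemo table n m d0 →
            (l.foldl (fun (st : Int × PySem.Dict (Int × Int) Int) d =>
              if 0 ≤ i + d.1 ∧ i + d.1 < n ∧ 0 ≤ j + d.2 ∧ j + d.2 < m then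
                if tblGet table (i + d.1) (j + d.2) = tblGet table i j + 1 then
                  ((max st.1 (1 + (get_chain_length k (i + d.1) (j + d.2) st.2 table n m).1),
                    (get_chain_length k (i + d.1) (j + d.2) st.2 table n m).2))
                else st
              else st) (mx, d0)).1 =
              l.foldl (fun mx d =>
                if 0 ≤ i + d.1 ∧ i + d.1 < n ∧ 0 ≤ j + d.2 ∧ j + d.2 < m ∧
                    valI table (i + d.1) (j + d.2) = valI table i j + 1 then
                  max mx (1 + Cc table n m (i + d.1) (j + d.2))
                else mx) mx ∧
            GoodMemo table n m (l.foldl (fun (st : Int × PySem.Dict (Int × Int) Int) d =>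
              if 0 ≤ i + d.1 ∧ i + d.1 < n ∧ 0 ≤ j + d.2 ∧ j + d.2 < m then
                if tblGet table (i + d.1) (j + d.2) = tblGet table i j + 1 then
                  ((max st.1 (1 + (get_chain_length k (i + d.1) (j + d.2) st.2 table n m).1),
                    (get_chain_length k (i + d.1) (j + d.2) st.2 table n m).2))
                else st
              else st) (mx, d0)).2 := by
          intro l
          induction l with
          | nil => intro mx d0 hg; exact ⟨rfl, hg⟩
          | cons d l ihl =>
            intro mx d0 hg
            simp only [List.foldl_cons]
            by_cases hb : 0 ≤ i + d.1 ∧ i + d.1 < n ∧ 0 ≤ j + d.2 ∧ j + d.2 < m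
            · rw [if_pos hb]
              have hvn : tblGet table (i + d.1) (j + d.2) = valI table (i + d.1) (j + d.2) :=
                tblGet_eq_valI table n m hpre _ _ hb.1 hb.2.1 hb.2.2.1 hb.2.2.2
              by_cases hval : valI table (i + d.1) (j + d.2) = valI table i j + 1
              · rw [if_pos (by rw [hvn, hv]; omega)]
                have hglt := qual_g_lt table n m i j (i + d.1) (j + d.2) hb.1 hb.2.1 hb.2.2.1 hb.2.2.2 hval
                have hrec := IH k (by omega) (i + d.1) (j + d.2) d0 hg hb.1 hb.2.1 hb.2.2.1 hb.2.2.2 (by omega)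
                rw [if_pos ⟨hb.1, hb.2.1, hb.2.2.1, hb.2.2.2, hval⟩]
                rw [hrec.1] at *
                exact ihl _ _ hrec.2
              · rw [if_neg (by rw [hvn, hv]; omega), if_neg (by intro h; exact hval h.2.2.2.2)]
                exact ihl _ _ hg
            · rw [if_neg hb, if_neg (by intro h; exact hb ⟨h.1, h.2.1, h.2.2.1, h.2.2.2.1⟩)]
              exact ihl _ _ hg
        obtain ⟨h1, h2⟩ := inner [((0:Int), (1:Int)), (1, 0), (0, -1), (-1, 0)] 1 memo hgood
        constructor
        · simp only [h1, ← Cc_unfold]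
        · intro p v hp
          rw [PySem.Dict.get?_insert] at hp
          split_ifs at hp with hpe
          · subst hpe
            simp only [Option.some.injEq] at hp
            rw [← hp, h1, ← Cc_unfold]
          · exact h2 p v hp

theorem loopA (table : List (List Int)) (n m : Int)
    (hpre : Pre_get_max_chain_length n m table) (fuel : Nat)
    (hfuel : fuel = n.toNat * m.toNat + 1) :
    ∀ (l : List (Int × Int)), (∀ p ∈ l, 0 ≤ p.1 ∧ p.1 < n ∧ 0 ≤ p.2 ∧ p.2 < m) →
    ∀ (best : Int) (memo : PySem.Dict (Int × Int) Int), GoodMemo table n m memo →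
    (l.foldl (fun (st : Int × PySem.Dict (Int × Int) Int) p =>
        (max st.1 (get_chain_length fuel p.1 p.2 st.2 table n m).1,
         (get_chain_length fuel p.1 p.2 st.2 table n m).2)) (best, memo)).1 =
      l.foldl (fun b p => max b (Cc table n m p.1 p.2)) best := by
  intro l
  induction l with
  | nil => intro _ best memo _; rfl
  | cons p l ihl =>
    intro hb best memo hg
    have hp := hb p (by simp)
    have hrec := get_chain_length_correct table n m hpre fuel p.1 p.2 memo hg
      hp.1 hp.2.1 hp.2.2.1 hp.2.2.2 (by rw [hfuel]; exact gBig_lt_fuel table n m p.1 p.2)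
    simp only [List.foldl_cons]
    rw [hrec.1]
    exact ihl (fun q hq => hb q (by simp [hq])) _ _ hrec.2

theorem portA_eq (n m : Int) (table : List (List Int))
    (hpre : Pre_get_max_chain_length n m table) :
    get_max_chain_length n m table =
      ((PySem.List.pyRange 0 n 1).flatMap
        (fun i => (PySem.List.pyRange 0 m 1).map (fun j => (i, j)))).foldl
        (fun b p => max b (Cc table n m p.1 p.2)) 0 := by
  have hb : ∀ p ∈ (PySem.List.pyRange 0 n 1).flatMap
      (fun i => (PySem.List.pyRange 0 m 1).map (fun j => (i, j))),
      0 ≤ p.1 ∧ p.1 < n ∧ 0 ≤ p.2 ∧ p.2 < m := by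
    intro p hp
    simp only [List.mem_flatMap, List.mem_map, PySem.List.mem_pyRange_one] at hp
    obtain ⟨i, hi, j, hj, rfl⟩ := hp
    exact ⟨hi.1, hi.2, hj.1, hj.2⟩
  have h := loopA table n m hpre (n.toNat * m.toNat + 1) rfl
    ((PySem.List.pyRange 0 n 1).flatMap
      (fun i => (PySem.List.pyRange 0 m 1).map (fun j => (i, j)))) hb 0 PySem.Dict.empty
    (by intro p v hp; simp [PySem.Dict.get?_empty] at hp)
  rw [← h, List.foldl_flatMap]
  simp only [List.foldl_map]
  rfl

-- B-side: the step of B's main loop, named so the loop invariant can be rewritten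
def stepB (table : List (List Int)) (n m : Int)
    (st : Int × PySem.Dict (Int × Int) Int) (c : Int × Int × Int) :
    Int × PySem.Dict (Int × Int) Int :=
  let best := st.1
  let dp := st.2
  let v := c.1
  let i := c.2.1
  let j := c.2.2
  let length := [(i, j + 1), (i + 1, j), (i, j - 1), (i - 1, j)].foldl
    (fun len p =>
      if 0 ≤ p.1 ∧ p.1 < n ∧ 0 ≤ p.2 ∧ p.2 < m ∧ tblGet table p.1 p.2 = v + 1 then
        max len (1 + dp.getD p 0)
      else len) 1
  (if length > best then length else best, dp.insert (i, j) length)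

-- the head cell's `length` computation in B is the true chain length
theorem lenB_eq (table : List (List Int)) (n m : Int)
    (hpre : Pre_get_max_chain_length n m table) (i j : Int)
    (dp : PySem.Dict (Int × Int) Int) (hg : GoodMemo table n m dp)
    (hnb : ∀ a b : Int, 0 ≤ a → a < n → 0 ≤ b → b < m →
      valI table a b = valI table i j + 1 → dp.contains (a, b) = true) :
    ([(i, j + 1), (i + 1, j), (i, j - 1), (i - 1, j)].foldl
      (fun len p =>
        if 0 ≤ p.1 ∧ p.1 < n ∧ 0 ≤ p.2 ∧ p.2 < m ∧ tblGet table p.1 p.2 = valI table i j + 1 then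
          max len (1 + dp.getD p 0)
        else len) 1) = Cc table n m i j := by
  have hmap : [((0:Int), (1:Int)), (1, 0), (0, -1), (-1, 0)].map
      (fun d => (i + d.1, j + d.2)) = [(i, j + 1), (i + 1, j), (i, j - 1), (i - 1, j)] := by
    simp only [List.map_cons, List.map_nil]
    norm_num
    constructor <;> ring
  rw [Cc_unfold, ← List.foldl_map (f := fun d : Int × Int => (i + d.1, j + d.2))
    (g := fun mx p => if 0 ≤ p.1 ∧ p.1 < n ∧ 0 ≤ p.2 ∧ p.2 < m ∧
        valI table p.1 p.2 = valI table i j + 1 then max mx (1 + Cc table n m p.1 p.2) else mx),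
    hmap]
  apply PySem.List.foldl_congr_mem
  intro len p _
  by_cases hb : 0 ≤ p.1 ∧ p.1 < n ∧ 0 ≤ p.2 ∧ p.2 < m
  · have hv : tblGet table p.1 p.2 = valI table p.1 p.2 :=
      tblGet_eq_valI table n m hpre _ _ hb.1 hb.2.1 hb.2.2.1 hb.2.2.2
    by_cases hval : valI table p.1 p.2 = valI table i j + 1
    · rw [if_pos ⟨hb.1, hb.2.1, hb.2.2.1, hb.2.2.2, by omega⟩,
        if_pos ⟨hb.1, hb.2.1, hb.2.2.1, hb.2.2.2, hval⟩]
      have hc := hnb p.1 p.2 hb.1 hb.2.1 hb.2.2.1 hb.2.2.2 hval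
      rw [PySem.Dict.contains_eq_isSome_get?] at hc
      obtain ⟨w, hw⟩ := Option.isSome_iff_exists.mp hc
      rw [PySem.Dict.getD_of_get?_eq_some _ _ hw, hg (p.1, p.2) w (by simpa using hw)]
    · rw [if_neg (by intro h; rw [hv] at h; exact hval h.2.2.2.2),
        if_neg (by intro h; exact hval h.2.2.2.2)]
  · rw [if_neg (by intro h; exact hb ⟨h.1, h.2.1, h.2.2.1, h.2.2.2.1⟩),
      if_neg (by intro h; exact hb ⟨h.1, h.2.1, h.2.2.1, h.2.2.2.1⟩)]

theorem loopB (table : List (List Int)) (n m : Int)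
    (hpre : Pre_get_max_chain_length n m table) :
    ∀ (L : List (Int × Int × Int)) (best : Int) (dp : PySem.Dict (Int × Int) Int),
    (∀ c ∈ L, 0 ≤ c.2.1 ∧ c.2.1 < n ∧ 0 ≤ c.2.2 ∧ c.2.2 < m ∧ c.1 = valI table c.2.1 c.2.2) →
    L.Pairwise (fun a b => b.1 ≤ a.1) →
    GoodMemo table n m dp →
    (∀ a b : Int, 0 ≤ a → a < n → 0 ≤ b → b < m →
      (valI table a b, a, b) ∈ L ∨ dp.contains (a, b) = true) →
    (L.foldl (stepB table n m) (best, dp)).1 =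
    L.foldl (fun b c => max b (Cc table n m c.2.1 c.2.2)) best := by
  intro L
  induction L with
  | nil => intro _ _ _ _ _ _; rfl
  | cons c L ihl =>
    intro best dp h1 h2 hg h3
    have hc := h1 c (by simp)
    have hcv : c.1 = valI table c.2.1 c.2.2 := hc.2.2.2.2
    have hlen : ([(c.2.1, c.2.2 + 1), (c.2.1 + 1, c.2.2), (c.2.1, c.2.2 - 1), (c.2.1 - 1, c.2.2)].foldl
        (fun len p =>
          if 0 ≤ p.1 ∧ p.1 < n ∧ 0 ≤ p.2 ∧ p.2 < m ∧ tblGet table p.1 p.2 = c.1 + 1 then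
            max len (1 + dp.getD p 0)
          else len) 1) = Cc table n m c.2.1 c.2.2 := by
      rw [hcv]
      apply lenB_eq table n m hpre _ _ dp hg
      intro a b ha1 ha2 hb1 hb2 hvab
      rcases h3 a b ha1 ha2 hb1 hb2 with hmem | hcon
      · rcases List.mem_cons.mp hmem with heq | hmem'
        · exfalso
          have : (valI table a b, a, b).1 = c.1 := by rw [← heq]
          rw [hcv] at this
          omega
        · exfalso
          have := (List.pairwise_cons.mp h2).1 _ hmem'
          simp only at this
          rw [hcv] at this
          omega
      · exact hcon
    have hmax : (if Cc table n m c.2.1 c.2.2 > best then Cc table n m c.2.1 c.2.2 else best) =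
        max best (Cc table n m c.2.1 c.2.2) := by
      rw [Int.max_def]; split_ifs <;> omega
    rw [List.foldl_cons, List.foldl_cons]
    have hX : stepB table n m (best, dp) c =
        (max best (Cc table n m c.2.1 c.2.2),
         dp.insert (c.2.1, c.2.2) (Cc table n m c.2.1 c.2.2)) := by
      show (if ([(c.2.1, c.2.2 + 1), (c.2.1 + 1, c.2.2), (c.2.1, c.2.2 - 1), (c.2.1 - 1, c.2.2)].foldl
          (fun len p =>
            if 0 ≤ p.1 ∧ p.1 < n ∧ 0 ≤ p.2 ∧ p.2 < m ∧ tblGet table p.1 p.2 = c.1 + 1 then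
              max len (1 + dp.getD p 0)
            else len) 1) > best then
            ([(c.2.1, c.2.2 + 1), (c.2.1 + 1, c.2.2), (c.2.1, c.2.2 - 1), (c.2.1 - 1, c.2.2)].foldl
          (fun len p =>
            if 0 ≤ p.1 ∧ p.1 < n ∧ 0 ≤ p.2 ∧ p.2 < m ∧ tblGet table p.1 p.2 = c.1 + 1 then
              max len (1 + dp.getD p 0)
            else len) 1) else best,
          dp.insert (c.2.1, c.2.2) ([(c.2.1, c.2.2 + 1), (c.2.1 + 1, c.2.2), (c.2.1, c.2.2 - 1), (c.2.1 - 1, c.2.2)].foldl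
          (fun len p =>
            if 0 ≤ p.1 ∧ p.1 < n ∧ 0 ≤ p.2 ∧ p.2 < m ∧ tblGet table p.1 p.2 = c.1 + 1 then
              max len (1 + dp.getD p 0)
            else len) 1)) =
        (max best (Cc table n m c.2.1 c.2.2),
         dp.insert (c.2.1, c.2.2) (Cc table n m c.2.1 c.2.2))
      rw [hlen, hmax]
    rw [hX]
    apply ihl
    · intro x hx; exact h1 x (by simp [hx])
    · exact (List.pairwise_cons.mp h2).2
    · intro p w hp
      rw [PySem.Dict.get?_insert] at hp
      split_ifs at hp with hpe
      · subst hpe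
        simp only [Option.some.injEq] at hp
        simpa using hp.symm
      · exact hg p w hp
    · intro a b ha1 ha2 hb1 hb2
      rcases h3 a b ha1 ha2 hb1 hb2 with hmem | hcon
      · rcases List.mem_cons.mp hmem with heq | hmem'
        · right
          have : (a, b) = (c.2.1, c.2.2) := by
            rw [← heq]
          rw [this, PySem.Dict.contains_insert]
          simp
        · left; exact hmem'
      · right
        rw [PySem.Dict.contains_insert, hcon]
        simp

theorem portB_eq (n m : Int) (table : List (List Int))
    (hpre : Pre_get_max_chain_length n m table) :
    get_max_chain_length_alt n m table =
      ((PySem.List.pyRange 0 n 1).flatMap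
        (fun i => (PySem.List.pyRange 0 m 1).map (fun j => (i, j)))).foldl
        (fun b p => max b (Cc table n m p.1 p.2)) 0 := by
  have hport : get_max_chain_length_alt n m table =
      ((PySem.List.sorted ((PySem.List.pyRange 0 n 1).flatMap
        (fun i => (PySem.List.pyRange 0 m 1).map (fun j => (tblGet table i j, i, j))))
        (fun c => c.1) true).foldl (stepB table n m) (0, PySem.Dict.empty)).1 := rfl
  rw [hport]
  have hcells : ∀ c ∈ (PySem.List.sorted ((PySem.List.pyRange 0 n 1).flatMap
      (fun i => (PySem.List.pyRange 0 m 1).map (fun j => (tblGet table i j, i, j))))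
      (fun c => c.1) true),
      0 ≤ c.2.1 ∧ c.2.1 < n ∧ 0 ≤ c.2.2 ∧ c.2.2 < m ∧ c.1 = valI table c.2.1 c.2.2 := by
    intro c hc
    rw [PySem.List.mem_sorted] at hc
    simp only [List.mem_flatMap, List.mem_map, PySem.List.mem_pyRange_one] at hc
    obtain ⟨i, hi, j, hj, rfl⟩ := hc
    exact ⟨hi.1, hi.2, hj.1, hj.2,
      tblGet_eq_valI table n m hpre i j hi.1 hi.2 hj.1 hj.2⟩
  rw [loopB table n m hpre _ 0 PySem.Dict.empty hcells
    (PySem.List.sorted_pairwise_rev _ _)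
    (by intro p v hp; rw [PySem.Dict.get?_empty] at hp; exact absurd hp (by simp))
    (by
      intro a b ha1 ha2 hb1 hb2
      left
      rw [PySem.List.mem_sorted]
      simp only [List.mem_flatMap, List.mem_map, PySem.List.mem_pyRange_one]
      exact ⟨a, ⟨ha1, ha2⟩, b, ⟨hb1, hb2⟩,
        by rw [tblGet_eq_valI table n m hpre a b ha1 ha2 hb1 hb2]⟩)]
  rw [← List.foldl_map (f := fun c : Int × Int × Int => c.2)
    (g := fun (b : Int) (p : Int × Int) => max b (Cc table n m p.1 p.2))]
  have hperm : ((PySem.List.sorted ((PySem.List.pyRange 0 n 1).flatMap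
      (fun i => (PySem.List.pyRange 0 m 1).map (fun j => (tblGet table i j, i, j))))
      (fun c => c.1) true).map (fun c : Int × Int × Int => c.2)).Perm
      ((PySem.List.pyRange 0 n 1).flatMap
        (fun i => (PySem.List.pyRange 0 m 1).map (fun j => (i, j)))) := by
    have h1 := (PySem.List.sorted_perm ((PySem.List.pyRange 0 n 1).flatMap
      (fun i => (PySem.List.pyRange 0 m 1).map (fun j => (tblGet table i j, i, j))))
      (fun c => c.1) true).map (fun c : Int × Int × Int => c.2)
    have h2 : (((PySem.List.pyRange 0 n 1).flatMap
        (fun i => (PySem.List.pyRange 0 m 1).map (fun j => (tblGet table i j, i, j)))).map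
        (fun c : Int × Int × Int => c.2)) =
        ((PySem.List.pyRange 0 n 1).flatMap
          (fun i => (PySem.List.pyRange 0 m 1).map (fun j => (i, j)))) := by
      rw [List.map_flatMap]
      simp only [List.map_map]
      rfl
    rw [h2] at h1
    exact h1
  haveI : RightCommutative (fun (b : Int) (p : Int × Int) => max b (Cc table n m p.1 p.2)) :=
    ⟨fun b a1 a2 => max_right_comm b _ _⟩
  exact hperm.foldl_eq 0

-- ===== VERDICT (by name: the statement is the Claim_ definition above) =====
theorem get_max_chain_length_spec : Claim_equal_get_max_chain_length := by
  intro n m table _ hpre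
  unfold Spec_get_max_chain_length
  rw [portA_eq n m table hpre, portB_eq n m table hpre]
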